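-- pv_equiv track=rewrite | github.com/Andry925/Methodologies_2 | main/ansi_convertor.py | convert_preformatted_text
-- ===== SOURCE A (Python) =====
-- def convert_preformatted_text(lines):
--     in_block = False
--     preformatted_block = ""
--     for line in lines:
--         if line.strip() == "```":
--             in_block = not in_block
--             if not in_block:
--                 yield f"\x1b[7m{preformatted_block.strip()}\x1b[27m'"
--                 preformatted_block = ""
--             continue
--         if in_block:
--             preformatted_block += line
--         else:
--             yield line
-- ===== SOURCE B (Python) =====
-- def convert_preformatted_text(lines):
--     it = iter(lines)
--     for line in it:
--         if line.strip() == "```":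
--             block = []
--             for inner in it:
--                 if inner.strip() == "```":
--                     yield f"\x1b[7m{''.join(block).strip()}\x1b[27m'"
--                     break
--                 block.append(inner)
--         else:
--             yield line
-- ===== Notes on version B (the rewrite author's own statement) =====
-- stated objective: simpler
-- what changed: Replaced A's boolean in_block flag plus growing string accumulator with nested iteration over one shared iterator: the outer loop yields plain lines, and on an opening fence an inner loop collects block lines until the closing fence and yields the joined wrapped block (an unclosed trailing block is dropped because the inner loop simply exhausts the iterator).
import Mathlib
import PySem

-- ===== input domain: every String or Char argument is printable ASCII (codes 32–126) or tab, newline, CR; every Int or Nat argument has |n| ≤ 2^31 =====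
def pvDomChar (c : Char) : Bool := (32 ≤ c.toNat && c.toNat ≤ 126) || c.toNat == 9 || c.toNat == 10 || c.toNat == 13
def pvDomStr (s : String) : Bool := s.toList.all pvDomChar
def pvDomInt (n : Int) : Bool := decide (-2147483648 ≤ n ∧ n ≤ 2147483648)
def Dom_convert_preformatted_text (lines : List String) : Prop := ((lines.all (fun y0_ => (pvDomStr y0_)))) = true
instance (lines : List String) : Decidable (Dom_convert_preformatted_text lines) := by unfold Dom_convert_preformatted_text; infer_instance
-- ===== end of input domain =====

-- B replaces A's boolean flag + string accumulator state machine with nested iteration over one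
-- shared iterator (outer loop yields plain lines, inner loop collects a fenced block); objective: simpler.

-- ===== PORT A =====
-- A's generator loop: state = (in_block, preformatted_block); the yielded items are accumulated.
def convAGo (inBlock : Bool) (buf : String) : List String → List String
  | [] => []
  | l :: ls =>
    if PySem.Str.strip l = "```" then
      -- in_block = not in_block; if not in_block: yield wrapped block, reset buffer
      if (!inBlock) = false then
        ("\x1b[7m" ++ PySem.Str.strip buf ++ "\x1b[27m'") :: convAGo (!inBlock) "" ls
      else
        convAGo (!inBlock) buf ls
    else
      if inBlock then convAGo inBlock (buf ++ l) ls
      else l :: convAGo inBlock buf ls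

def convert_preformatted_text (lines : List String) : List String :=
  convAGo false "" lines

-- ===== PORT B =====
-- B's inner `for inner in it` loop: collects lines into `block` until a closing fence;
-- returns the block and the not-yet-consumed remainder, or none if the iterator is exhausted.
def scanBlock (block : List String) : List String → Option (List String × List String)
  | [] => none
  | l :: ls =>
    if PySem.Str.strip l = "```" then some (block, ls)
    else scanBlock (block ++ [l]) ls

theorem scanBlock_rest_lt (block : List String) :
    ∀ (ls : List String) (b r : List String),
      scanBlock block ls = some (b, r) → r.length < ls.length := by
  intro ls
  induction ls generalizing block with
  | nil => intro b r h; simp [scanBlock] at h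
  | cons l t ih =>
    intro b r h
    simp only [scanBlock] at h
    split at h
    · cases h; simp
    · exact Nat.lt_trans (ih _ _ _ h) (by simp)

-- B's outer `for line in it` loop over the shared iterator.
def convert_preformatted_text_alt : List String → List String
  | [] => []
  | l :: ls =>
    if PySem.Str.strip l = "```" then
      match h : scanBlock [] ls with
      | some (blk, rest) =>
        ("\x1b[7m" ++ PySem.Str.strip (PySem.Str.join "" blk) ++ "\x1b[27m'")
          :: convert_preformatted_text_alt rest
      | none => []
    else l :: convert_preformatted_text_alt ls
termination_by ls => ls.length
decreasing_by
  · exact Nat.lt_trans (scanBlock_rest_lt [] ls blk rest h) (by simp)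
  · simp

-- ===== PRECONDITION & SPEC =====
def Spec_convert_preformatted_text (lines : List String) (out : List String) : Prop := out = convert_preformatted_text_alt lines
instance (lines : List String) (out : List String) : Decidable (Spec_convert_preformatted_text lines out) := by unfold Spec_convert_preformatted_text; infer_instance

-- ===== CLAIM (what is proved, stated in full; the proofs are below) =====
def Claim_equal_convert_preformatted_text : Prop := ∀ (lines : List String), Dom_convert_preformatted_text lines → Spec_convert_preformatted_text lines (convert_preformatted_text lines)

-- ===== LEMMAS AND PROOFS =====

theorem str_toList_inj {s t : String} (h : s.toList = t.toList) : s = t :=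
  String.toList_inj.mp h

theorem joinNil_cons (x : String) (xs : List String) :
    PySem.Str.join "" (x :: xs) = x ++ PySem.Str.join "" xs := by
  apply str_toList_inj
  cases xs with
  | nil => simp [PySem.Str.toList_join, PySem.Chars.join_singleton, PySem.Chars.join_nil]
  | cons y ys =>
    simp [PySem.Str.toList_join, PySem.Chars.join_cons_cons]

theorem joinNil_nil : PySem.Str.join "" ([] : List String) = "" := by
  apply str_toList_inj
  simp [PySem.Str.toList_join, PySem.Chars.join_nil]

theorem scanBlock_acc (acc : List String) :
    ∀ (ls : List String),
      scanBlock acc ls = (scanBlock [] ls).map (fun p => (acc ++ p.1, p.2)) := by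
  intro ls
  induction ls generalizing acc with
  | nil => simp [scanBlock]
  | cons l t ih =>
    simp only [scanBlock]
    split
    · simp
    · simp only [List.nil_append]
      rw [ih, ih [l]]
      cases scanBlock [] t with
      | none => simp
      | some p => simp

theorem main_equiv :
    ∀ (n : ℕ) (ls : List String), ls.length ≤ n →
      (convAGo false "" ls = convert_preformatted_text_alt ls ∧
       ∀ buf, convAGo true buf ls =
         match scanBlock [] ls with
         | some (blk, rest) =>
             ("\x1b[7m" ++ PySem.Str.strip (buf ++ PySem.Str.join "" blk) ++ "\x1b[27m'")
               :: convert_preformatted_text_alt rest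
         | none => []) := by
  intro n
  induction n with
  | zero =>
    intro ls hls
    have : ls = [] := List.eq_nil_of_length_eq_zero (Nat.le_zero.mp hls)
    subst this
    constructor
    · simp [convAGo, convert_preformatted_text_alt]
    · intro buf; rfl
  | succ n ih =>
    intro ls hls
    cases ls with
    | nil =>
      constructor
      · simp [convAGo, convert_preformatted_text_alt]
      · intro buf; rfl
    | cons l t =>
      have ht : t.length ≤ n := by simpa using Nat.succ_le_succ_iff.mp hls
      constructor
      · -- in_block = false case
        by_cases hf : PySem.Str.strip l = "```"
        · -- opening fence: A flips to in_block = true; B enters the inner loop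
          simp only [convAGo, convert_preformatted_text_alt, hf, if_true, Bool.not_false,
            if_neg (by simp : ¬((true : Bool) = false))]
          rw [(ih t ht).2 ""]
          cases hsb : scanBlock [] t with
          | none => simp
          | some p =>
            obtain ⟨blk, rest⟩ := p
            have : ("" : String) ++ PySem.Str.join "" blk = PySem.Str.join "" blk := by
              apply str_toList_inj; simp
            simp [this]
        · simp only [convAGo, convert_preformatted_text_alt, if_neg hf, Bool.false_eq_true,
            if_false]
          rw [(ih t ht).1]
      · -- in_block = true case
        intro buf
        by_cases hf : PySem.Str.strip l = "```"
        · -- closing fence: A yields the wrapped buffer; scanBlock returns ([], t)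
          simp only [convAGo, scanBlock, hf, if_true, Bool.not_true]
          rw [(ih t ht).1]
          have : buf ++ PySem.Str.join "" [] = buf := by
            rw [joinNil_nil]; apply str_toList_inj; simp
          simp [this]
        · -- block line: A appends to buf; B's inner loop appends to block
          simp only [convAGo, scanBlock, if_neg hf, List.nil_append]
          rw [(ih t ht).2 (buf ++ l), scanBlock_acc [l] t]
          cases hsb : scanBlock [] t with
          | none => simp
          | some p =>
            obtain ⟨blk, rest⟩ := p
            have : buf ++ l ++ PySem.Str.join "" blk = buf ++ PySem.Str.join "" (l :: blk) := by
              rw [joinNil_cons]; apply str_toList_inj; simp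
            simp [this]

-- ===== VERDICT (by name: the statement is the Claim_ definition above) =====
theorem convert_preformatted_text_spec : Claim_equal_convert_preformatted_text := by
  intro lines _
  unfold Spec_convert_preformatted_text convert_preformatted_text
  exact (main_equiv lines.length lines le_rfl).1
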